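-- pv_equiv track=rewrite | github.com/timurka43/cipher_cracker | hw4.py | delete_chars
-- ===== SOURCE A (Python) =====
-- def delete_chars(message):
--      # convert the string to a list of chars
--      my_list = list(message)
--      # for each character in the message
--      index = 0
--      length = len(my_list)
--      while (index < length):
--           del my_list[index:index+2]
--           index += 5
--           length -= 2
--
--      # join the list of characters back into a string to return
--      message = ''.join(str(x) for x in my_list)
--      return message
-- ===== SOURCE B (Python) =====
-- def delete_chars(message):
--     # walk block starts 0, 7, 14, ... and collect positions 2..6 of each 7-char block
--     lst = list(message)
--     out = []
--     i = 0
--     while i < len(lst):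
--         out += lst[i + 2:i + 7]
--         i += 7
--     return ''.join(str(x) for x in out)
-- ===== Notes on version B (the rewrite author's own statement) =====
-- stated objective: faster
-- what changed: Replaces A's in-place del with shrinking index and length bookkeeping (each del shifts the whole tail) by a read-only walk over block starts that appends the slice lst[i+2:i+7] of each 7-char block.
import Mathlib
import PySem

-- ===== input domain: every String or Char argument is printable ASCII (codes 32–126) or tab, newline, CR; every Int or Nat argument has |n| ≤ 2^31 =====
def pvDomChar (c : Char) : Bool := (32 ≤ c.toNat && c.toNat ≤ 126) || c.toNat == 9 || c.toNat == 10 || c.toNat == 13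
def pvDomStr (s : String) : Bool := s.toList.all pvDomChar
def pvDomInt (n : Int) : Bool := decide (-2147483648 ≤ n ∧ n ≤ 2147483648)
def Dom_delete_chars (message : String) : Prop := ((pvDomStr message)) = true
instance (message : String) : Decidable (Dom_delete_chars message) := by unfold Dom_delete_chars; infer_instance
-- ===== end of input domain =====

-- B replaces A's in-place deletion (which shifts the whole tail on every block) by a
-- read-only walk over block starts that slices positions 2..6 of each 7-char block (objective: faster).

-- ===== PORT A =====
-- A's while loop: del my_list[index:index+2]; index += 5; length -= 2.
-- index stays ≥ 0 throughout (starts at 0, only grows), so `del lst[index:index+2]`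
-- is exactly `take index ++ drop (index+2)`; the `.toNat` casts are exact here.
def delAloop (lst : List Char) (index length : Int) : List Char :=
  if index < length then
    delAloop (lst.take index.toNat ++ lst.drop (index + 2).toNat) (index + 5) (length - 2)
  else lst
termination_by (length - index).toNat
decreasing_by omega

def delete_chars (message : String) : String :=
  String.mk (delAloop message.toList 0 (message.toList.length : Int))

-- ===== PORT B =====
-- B's while loop: out += lst[i+2:i+7]; i += 7.  i starts at 0 and only grows, so Nat is exact.
def delBloop (lst : List Char) (i : Nat) (out : List Char) : List Char :=
  if i < lst.length then
    delBloop lst (i + 7) (out ++ PySem.List.slice lst (some ((i : Int) + 2)) (some ((i : Int) + 7)))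
  else out
termination_by lst.length - i
decreasing_by omega

def delete_chars_alt (message : String) : String :=
  String.mk (delBloop message.toList 0 [])

-- ===== PRECONDITION & SPEC =====
def Spec_delete_chars (message : String) (out : String) : Prop := out = delete_chars_alt message
instance (message : String) (out : String) : Decidable (Spec_delete_chars message out) := by unfold Spec_delete_chars; infer_instance

-- ===== CLAIM (what is proved, stated in full; the proofs are below) =====
def Claim_equal_delete_chars : Prop := ∀ (message : String), Dom_delete_chars message → Spec_delete_chars message (delete_chars message)

-- ===== LEMMAS AND PROOFS =====

-- Proof-only intermediate: recursion over the untouched suffix, keeping chars 2..6 of each block.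
def chunkLoop (lst out : List Char) : List Char :=
  if lst = [] then out
  else chunkLoop (lst.drop 7) (out ++ (lst.drop 2).take 5)
termination_by lst.length
decreasing_by
  rename_i h
  have : lst.length ≠ 0 := by simpa using h
  simp only [List.length_drop]; omega

-- Invariant of A's loop: the first `index` elements are already kept, the rest is
-- the untouched suffix; the result is the chunk recursion on that suffix.
theorem delAloop_eq (n : Nat) (rest : List Char) (hn : rest.length ≤ n) (acc : List Char) :
    delAloop (acc ++ rest) (acc.length : Int) ((acc.length : Int) + (rest.length : Int))
      = chunkLoop rest acc := by
  induction n generalizing rest acc with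
  | zero =>
    have hre : rest = [] := by
      cases rest with
      | nil => rfl
      | cons a t => simp at hn
    subst hre
    rw [delAloop, chunkLoop]
    simp
  | succ n ih =>
    cases rest with
    | nil =>
      rw [delAloop, chunkLoop]
      simp
    | cons a t =>
      rw [delAloop]
      have hlt : (acc.length : Int) < (acc.length : Int) + ((a :: t).length : Int) := by
        simp only [List.length_cons]; push_cast; omega
      rw [if_pos hlt]
      have htake : (acc ++ a :: t).take ((acc.length : Int)).toNat = acc := by
        simp
      have hdrop : (acc ++ a :: t).drop (((acc.length : Int) + 2)).toNat = (a :: t).drop 2 := by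
        have h2 : (((acc.length : Int) + 2)).toNat = acc.length + 2 := by omega
        rw [h2, List.drop_append]
        simp
      rw [htake]
      by_cases h7 : (a :: t).length ≤ 7
      · -- loop stops after this iteration
        rw [hdrop, delAloop]
        have hstop : ¬ ((acc.length : Int) + 5 < (acc.length : Int) + ((a :: t).length : Int) - 2) := by
          simp only [List.length_cons] at h7 ⊢
          push_cast
          omega
        rw [if_neg hstop]
        rw [chunkLoop, if_neg (List.cons_ne_nil a t)]
        have ht2 : ((a :: t).drop 2).take 5 = (a :: t).drop 2 := by
          apply List.take_of_length_le
          simp only [List.length_drop, List.length_cons]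
          simp only [List.length_cons] at h7
          omega
        have ht7 : (a :: t).drop 7 = [] := by
          apply List.drop_eq_nil_of_le
          omega
        rw [ht2, ht7, chunkLoop, if_pos rfl]
      · -- long chunk: apply IH with the next block
        rw [Nat.not_le] at h7
        rw [hdrop]
        have hsplit : (a :: t).drop 2 = ((a :: t).drop 2).take 5 ++ (a :: t).drop 7 := by
          conv_lhs => rw [← List.take_append_drop 5 ((a :: t).drop 2)]
          rw [List.drop_drop]
        rw [hsplit, ← List.append_assoc]
        have hlen5 : (acc ++ ((a :: t).drop 2).take 5).length = acc.length + 5 := by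
          simp only [List.length_append, List.length_take, List.length_drop, List.length_cons]
          simp only [List.length_cons] at h7
          omega
        have e1 : (acc.length : Int) + 5 = ((acc ++ ((a :: t).drop 2).take 5).length : Int) := by
          rw [hlen5]; push_cast; ring
        have e2 : (acc.length : Int) + ((a :: t).length : Int) - 2
            = ((acc ++ ((a :: t).drop 2).take 5).length : Int) + (((a :: t).drop 7).length : Int) := by
          rw [hlen5]
          simp only [List.length_drop, List.length_cons]
          simp only [List.length_cons] at h7
          push_cast
          omega
        rw [e1, e2, ih ((a :: t).drop 7)
          (by simp only [List.length_drop, List.length_cons]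
              simp only [List.length_cons] at hn
              omega)]
        conv_rhs => rw [chunkLoop, if_neg (List.cons_ne_nil a t)]

-- B's index-stepping loop is the chunk recursion on the suffix from the current index.
theorem delBloop_eq (lst : List Char) (i : Nat) (out : List Char) :
    delBloop lst i out = chunkLoop (lst.drop i) out := by
  by_cases h : i < lst.length
  · rw [delBloop, if_pos h]
    have hslice : PySem.List.slice lst (some ((i : Int) + 2)) (some ((i : Int) + 7))
        = ((lst.drop i).drop 2).take 5 := by
      have e1 : (i : Int) + 2 = ((i + 2 : Nat) : Int) := by push_cast; ring
      have e2 : (i : Int) + 7 = ((i + 7 : Nat) : Int) := by push_cast; ring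
      rw [e1, e2, PySem.List.slice_natCast, List.drop_drop]
      have h52 : i + 7 - (i + 2) = 5 := by omega
      rw [h52]
    rw [hslice, delBloop_eq lst (i + 7) _]
    have hne : lst.drop i ≠ [] := by
      simp only [ne_eq, List.drop_eq_nil_iff]
      omega
    conv_rhs => rw [chunkLoop, if_neg hne]
    rw [← List.drop_drop]
  · rw [delBloop, if_neg h]
    have : lst.drop i = [] := List.drop_eq_nil_of_le (by omega)
    rw [this, chunkLoop, if_pos rfl]
termination_by lst.length - i
decreasing_by omega

-- ===== VERDICT (by name: the statement is the Claim_ definition above) =====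
theorem delete_chars_spec : Claim_equal_delete_chars := by
  intro message _
  unfold Spec_delete_chars delete_chars delete_chars_alt
  have hA := delAloop_eq message.toList.length message.toList (le_refl _) []
  simp only [List.nil_append, List.length_nil, Nat.cast_zero, zero_add] at hA
  rw [hA, delBloop_eq]
  rfl
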